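-- pv_equiv track=rewrite | github.com/jb-20-a11y/password-manager | password_generator.py | scramble_phrase
-- ===== SOURCE A (Python) =====
-- def scramble_phrase(phrase):
--   if len(phrase) == 0:
--     return ""
--   str = ""
--   ranges = [[0, len(phrase) - 1]]
--   while len(ranges) > 0:
--     new_ranges = []
--     for i in range(len(ranges)):
--       low = ranges[i][0]
--       high = ranges[i][1]
--       mid = (low + high) // 2
--       str += phrase[mid]
--       new_low1 = low
--       new_high1 = mid - 1
--       new_low2 = mid + 1
--       new_high2 = high
--       if new_high1 >= new_low1:
--         new_ranges.append([new_low1, new_high1])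
--       if new_high2 >= new_low2:
--         new_ranges.append([new_low2, new_high2])
--     ranges = new_ranges
--   return str
-- ===== SOURCE B (Python) =====
-- def scramble_phrase(phrase):
--   def levels(low, high):
--     # per-depth character groups of the midpoint tree over [low, high]
--     if low > high:
--       return []
--     mid = (low + high) // 2
--     left = levels(low, mid - 1)
--     right = levels(mid + 1, high)
--     deeper = []
--     i = 0
--     while i < len(left) or i < len(right):
--       l = left[i] if i < len(left) else ""
--       r = right[i] if i < len(right) else ""
--       deeper.append(l + r)
--       i += 1
--     return [phrase[mid]] + deeper
--   if len(phrase) == 0: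
--     return ""
--   return "".join(levels(0, len(phrase) - 1))
-- ===== Notes on version B (the rewrite author's own statement) =====
-- stated objective: alternative
-- what changed: Replaces A's iterative BFS over an explicit queue of index ranges with a divide-and-conquer recursion that returns per-depth character groups for each subrange and merges the two children's level lists depth by depth, joining all levels at the end.
import Mathlib
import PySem

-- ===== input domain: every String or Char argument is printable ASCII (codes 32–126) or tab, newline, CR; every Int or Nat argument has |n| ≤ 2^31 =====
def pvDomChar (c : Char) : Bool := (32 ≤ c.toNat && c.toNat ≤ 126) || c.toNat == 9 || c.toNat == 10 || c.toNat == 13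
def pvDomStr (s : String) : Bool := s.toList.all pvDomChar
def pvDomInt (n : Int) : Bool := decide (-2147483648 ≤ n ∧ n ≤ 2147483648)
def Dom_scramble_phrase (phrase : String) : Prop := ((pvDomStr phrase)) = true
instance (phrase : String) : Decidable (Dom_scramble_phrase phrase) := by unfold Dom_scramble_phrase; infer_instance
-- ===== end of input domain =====

-- B re-implements the BFS-midpoint scramble as a divide-and-conquer recursion that
-- merges per-depth character groups (objective: alternative decomposition, same cost).
-- Both ports take a Nat fuel argument as a totality guard only (it bounds the loop
-- sweep count / recursion depth); pv_loop_eq and pv_levels_fuel below prove the fuel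
-- passed by the entry points is never exhausted.

-- ===== PORT A =====
-- A's queue step: for one range, append phrase[mid] to the string and the surviving
-- child ranges to new_ranges (mid is always in range on reachable states, so the
-- ' ' default of pyGetD is never used).
def pvStepA (cs : List Char) (st : List Char × List (Int × Int)) (r : Int × Int) :
    List Char × List (Int × Int) :=
  let low := r.1
  let high := r.2
  let mid := PySem.Int.floordiv (low + high) 2
  let s1 := st.1 ++ [PySem.List.pyGetD cs mid ' ']
  let nr1 := if mid - 1 ≥ low then st.2 ++ [(low, mid - 1)] else st.2
  let nr2 := if high ≥ mid + 1 then nr1 ++ [(mid + 1, high)] else nr1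
  (s1, nr2)

-- one sweep of A's inner for-loop: builds (str so far, new_ranges) over the queue
def pvSweep (cs : List Char) (s : List Char) (ranges : List (Int × Int)) :
    List Char × List (Int × Int) :=
  List.foldl (pvStepA cs) (s, []) ranges

-- A's while-loop: s is the string built so far, ranges the current queue
def pvLoopA (cs : List Char) : Nat → List Char → List (Int × Int) → List Char
  | 0, s, _ => s
  | fuel + 1, s, ranges =>
    if ranges = [] then s
    else pvLoopA cs fuel (pvSweep cs s ranges).1 (pvSweep cs s ranges).2

def scramble_phrase (phrase : String) : String :=
  let cs := phrase.toList
  if cs.length = 0 then ""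
  else String.ofList (pvLoopA cs (cs.length + 1) [] [(0, (cs.length : Int) - 1)])

-- ===== PORT B =====
-- Source B's padded per-depth merge of the two child level lists ("" pads the shorter side)
def pvMerge (xs ys : List (List Char)) : List (List Char) :=
  match xs, ys with
  | [], ys => ys
  | xs, [] => xs
  | x :: xs, y :: ys => (x ++ y) :: pvMerge xs ys

-- Source B's levels(low, high): per-depth character groups of the midpoint tree
def pvLevels (cs : List Char) : Nat → Int → Int → List (List Char)
  | 0, _, _ => []
  | fuel + 1, low, high =>
    if low > high then []
    else
      let mid := PySem.Int.floordiv (low + high) 2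
      [PySem.List.pyGetD cs mid ' '] ::
        pvMerge (pvLevels cs fuel low (mid - 1)) (pvLevels cs fuel (mid + 1) high)

def scramble_phrase_alt (phrase : String) : String :=
  let cs := phrase.toList
  if cs.length = 0 then ""
  else String.ofList (pvLevels cs (cs.length + 1) 0 ((cs.length : Int) - 1)).flatten

-- ===== PRECONDITION & SPEC =====
def Spec_scramble_phrase (phrase : String) (out : String) : Prop := out = scramble_phrase_alt phrase
instance (phrase : String) (out : String) : Decidable (Spec_scramble_phrase phrase out) := by unfold Spec_scramble_phrase; infer_instance

-- ===== CLAIM (what is proved, stated in full; the proofs are below) =====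
def Claim_equal_scramble_phrase : Prop := ∀ (phrase : String), Dom_scramble_phrase phrase → Spec_scramble_phrase phrase (scramble_phrase phrase)

-- ===== LEMMAS AND PROOFS =====

-- the surviving child ranges a single range contributes in one sweep
def pvChild (r : Int × Int) : List (Int × Int) :=
  let mid := PySem.Int.floordiv (r.1 + r.2) 2
  (if mid - 1 ≥ r.1 then [(r.1, mid - 1)] else []) ++
  (if r.2 ≥ mid + 1 then [(mid + 1, r.2)] else [])

-- the character A appends for a range (= the head group of B's levels for that range)
def pvHead (cs : List Char) (r : Int × Int) : Char :=
  PySem.List.pyGetD cs (PySem.Int.floordiv (r.1 + r.2) 2) ' '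

def pvW (r : Int × Int) : Nat := (r.2 + 1 - r.1).toNat

def pvSumW (rs : List (Int × Int)) : Nat := (rs.map pvW).sum

-- B's levels of a range, with (always sufficient) canonical fuel
def pvLev (cs : List Char) (r : Int × Int) : List (List Char) :=
  pvLevels cs (pvW r + 1) r.1 r.2

def pvMergeAll (ls : List (List (List Char))) : List (List Char) := List.foldr pvMerge [] ls

lemma pv_foldl_snd (cs : List Char) (rs : List (Int × Int)) (s : List Char)
    (acc : List (Int × Int)) :
    (List.foldl (pvStepA cs) (s, acc) rs).2 = acc ++ rs.flatMap pvChild := by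
  induction rs generalizing s acc with
  | nil => simp
  | cons r rs ih =>
    simp only [List.foldl_cons, List.flatMap_cons]
    rw [show pvStepA cs (s, acc) r =
        (s ++ [PySem.List.pyGetD cs (PySem.Int.floordiv (r.1 + r.2) 2) ' '],
          acc ++ pvChild r) by
      simp only [pvStepA, pvChild]; split_ifs <;> simp]
    rw [ih]; simp

lemma pv_sweep_snd (cs : List Char) (s : List Char) (rs : List (Int × Int)) :
    (pvSweep cs s rs).2 = rs.flatMap pvChild := by
  rw [pvSweep, pv_foldl_snd, List.nil_append]

lemma pv_foldl_fst (cs : List Char) (rs : List (Int × Int)) (s : List Char)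
    (acc : List (Int × Int)) :
    (List.foldl (pvStepA cs) (s, acc) rs).1 = s ++ rs.map (pvHead cs) := by
  induction rs generalizing s acc with
  | nil => simp
  | cons r rs ih =>
    simp only [List.foldl_cons, List.map_cons]
    rw [show pvStepA cs (s, acc) r = ((s ++ [pvHead cs r],
        (pvStepA cs (s, acc) r).2) : List Char × List (Int × Int)) by
      simp [pvStepA, pvHead]]
    rw [ih]; simp

lemma pv_child_sum (r : Int × Int) :
    pvSumW (pvChild r) ≤ pvW r ∧ (0 < pvW r → pvSumW (pvChild r) < pvW r) ∧
      (pvW r = 0 → pvChild r = []) := by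
  simp only [pvChild, pvSumW, pvW,
    PySem.Int.floordiv_eq_ediv_of_pos (a := r.1 + r.2) (by norm_num : (0:Int) < 2)]
  split_ifs <;> simp [pvW] <;> omega

lemma pv_sum_flat (rs : List (Int × Int)) :
    pvSumW (rs.flatMap pvChild) < pvSumW rs ∨
      (rs.flatMap pvChild = [] ∧ pvSumW rs = 0) := by
  induction rs with
  | nil => right; exact ⟨rfl, rfl⟩
  | cons r rs ih =>
    obtain ⟨hle, hlt, hnil⟩ := pv_child_sum r
    have hsum : ∀ a b : List (Int × Int), pvSumW (a ++ b) = pvSumW a + pvSumW b := by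
      intro a b; simp [pvSumW]
    have hcons : pvSumW (r :: rs) = pvW r + pvSumW rs := by simp [pvSumW]
    rcases ih with ih | ⟨h1, h2⟩
    · left; simp only [List.flatMap_cons, hsum]
      omega
    · have hflat0 : pvSumW (rs.flatMap pvChild) = 0 := by rw [h1]; rfl
      by_cases hw : 0 < pvW r
      · left
        simp only [List.flatMap_cons, hsum]
        have := hlt hw
        omega
      · right
        have hw0 : pvW r = 0 := by omega
        constructor
        · simp [List.flatMap_cons, hnil hw0, h1]
        · simp [pvSumW] at h2 ⊢; exact ⟨by simpa [pvW] using hw0, h2⟩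

lemma pv_sum_strict (rs : List (Int × Int)) (hne : rs ≠ [])
    (hv : ∀ x ∈ rs, x.1 ≤ x.2) :
    pvSumW (rs.flatMap pvChild) < pvSumW rs := by
  rcases pv_sum_flat rs with h | ⟨_, h0⟩
  · exact h
  · exfalso
    obtain ⟨r, rs', rfl⟩ : ∃ r rs', rs = r :: rs' := by
      cases rs with
      | nil => exact absurd rfl hne
      | cons a b => exact ⟨a, b, rfl⟩
    have hr : r.1 ≤ r.2 := hv r (by simp)
    have : pvSumW (r :: rs') = pvW r + pvSumW rs' := by simp [pvSumW]
    have : 0 < pvW r := by simp only [pvW]; omega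
    omega

lemma pv_child_valid (r : Int × Int) : ∀ x ∈ pvChild r, x.1 ≤ x.2 := by
  intro x hx
  simp only [pvChild, List.mem_append] at hx
  rcases hx with hx | hx <;> split_ifs at hx <;> simp_all

lemma pv_merge_nil_right (xs : List (List Char)) : pvMerge xs [] = xs := by
  cases xs <;> rfl

lemma pv_merge_assoc (a b c : List (List Char)) :
    pvMerge (pvMerge a b) c = pvMerge a (pvMerge b c) := by
  induction a generalizing b c with
  | nil => rfl
  | cons x a ih =>
    cases b with
    | nil => rfl
    | cons y b =>
      cases c with
      | nil => rw [pv_merge_nil_right, pv_merge_nil_right]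
      | cons z c => simp [pvMerge, ih, List.append_assoc]

lemma pv_foldr_merge (xs : List (List (List Char))) (init : List (List Char)) :
    List.foldr pvMerge init xs = pvMerge (List.foldr pvMerge [] xs) init := by
  induction xs with
  | nil => rfl
  | cons x xs ih => simp [List.foldr_cons, ih, pv_merge_assoc]

lemma pv_mergeAll_append (xs ys : List (List (List Char))) :
    pvMergeAll (xs ++ ys) = pvMerge (pvMergeAll xs) (pvMergeAll ys) := by
  simp only [pvMergeAll, List.foldr_append]
  rw [pv_foldr_merge]

lemma pv_levels_empty (cs : List Char) (fuel : Nat) (low high : Int) (h : low > high) :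
    pvLevels cs fuel low high = [] := by
  cases fuel with
  | zero => rfl
  | succ fuel => simp [pvLevels, h]

lemma pv_levels_fuel (cs : List Char) :
    ∀ (f1 f2 : Nat) (low high : Int), (high + 1 - low).toNat < f1 →
      (high + 1 - low).toNat < f2 → pvLevels cs f1 low high = pvLevels cs f2 low high := by
  intro f1
  induction f1 with
  | zero => intro f2 low high h1 _; exact absurd h1 (by omega)
  | succ f1 ih =>
    intro f2 low high h1 h2
    cases f2 with
    | zero => exact absurd h2 (by omega)
    | succ f2 =>
      by_cases hlh : low > high
      · rw [pv_levels_empty cs _ _ _ hlh, pv_levels_empty cs _ _ _ hlh]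
      · have hm := PySem.Int.floordiv_two_mid_bounds (not_lt.mp hlh)
        simp only [pvLevels, if_neg hlh]
        rw [ih f2 low (PySem.Int.floordiv (low + high) 2 - 1) (by omega) (by omega),
          ih f2 (PySem.Int.floordiv (low + high) 2 + 1) high (by omega) (by omega)]

lemma pv_lev_valid (cs : List Char) (r : Int × Int) (h : r.1 ≤ r.2) :
    pvLev cs r = [pvHead cs r] :: pvMergeAll ((pvChild r).map (pvLev cs)) := by
  have hm := PySem.Int.floordiv_two_mid_bounds h
  have hleft : pvLevels cs (pvW r) r.1 (PySem.Int.floordiv (r.1 + r.2) 2 - 1) =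
      pvLev cs (r.1, PySem.Int.floordiv (r.1 + r.2) 2 - 1) := by
    refine pv_levels_fuel cs _ _ _ _ ?_ ?_ <;> simp only [pvW] <;> omega
  have hright : pvLevels cs (pvW r) (PySem.Int.floordiv (r.1 + r.2) 2 + 1) r.2 =
      pvLev cs (PySem.Int.floordiv (r.1 + r.2) 2 + 1, r.2) := by
    refine pv_levels_fuel cs _ _ _ _ ?_ ?_ <;> simp only [pvW] <;> omega
  rw [pvLev]
  simp only [pvLevels, if_neg (not_lt.mpr h), pvHead, pvChild]
  rw [hleft, hright]
  split_ifs with h1 h2 h2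
  · simp [pvMergeAll, pv_merge_nil_right]
  · rw [show pvLev cs (PySem.Int.floordiv (r.1 + r.2) 2 + 1, r.2) =
        ([] : List (List Char)) from pv_levels_empty cs _ _ _ (by omega)]
    simp [pvMergeAll, pv_merge_nil_right]
  · rw [show pvLev cs (r.1, PySem.Int.floordiv (r.1 + r.2) 2 - 1) =
        ([] : List (List Char)) from pv_levels_empty cs _ _ _ (by omega)]
    simp [pvMergeAll, pvMerge, pv_merge_nil_right]
  · rw [show pvLev cs (r.1, PySem.Int.floordiv (r.1 + r.2) 2 - 1) =
        ([] : List (List Char)) from pv_levels_empty cs _ _ _ (by omega),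
      show pvLev cs (PySem.Int.floordiv (r.1 + r.2) 2 + 1, r.2) =
        ([] : List (List Char)) from pv_levels_empty cs _ _ _ (by omega)]
    rfl

lemma pv_mergeAll_struct (cs : List Char) (r : Int × Int) (rs : List (Int × Int))
    (h : ∀ x ∈ r :: rs, x.1 ≤ x.2) :
    pvMergeAll ((r :: rs).map (pvLev cs)) =
      ((r :: rs).map (pvHead cs)) ::
        pvMergeAll (((r :: rs).flatMap pvChild).map (pvLev cs)) := by
  induction rs generalizing r with
  | nil =>
    simp only [List.map_cons, List.map_nil, pvMergeAll, List.foldr_cons, List.foldr_nil,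
      pv_merge_nil_right, List.flatMap_cons, List.flatMap_nil, List.append_nil]
    rw [pv_lev_valid cs r (h r (by simp))]
    rfl
  | cons r2 rs ih =>
    have h2 : ∀ x ∈ r2 :: rs, x.1 ≤ x.2 := fun x hx => h x (by simp at hx ⊢; tauto)
    have hr : r.1 ≤ r.2 := h r (by simp)
    calc pvMergeAll ((r :: r2 :: rs).map (pvLev cs))
        = pvMerge (pvLev cs r) (pvMergeAll ((r2 :: rs).map (pvLev cs))) := rfl
      _ = pvMerge
            ([pvHead cs r] :: pvMergeAll ((pvChild r).map (pvLev cs)))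
            (((r2 :: rs).map (pvHead cs)) ::
              pvMergeAll (((r2 :: rs).flatMap pvChild).map (pvLev cs))) := by
          rw [pv_lev_valid cs r hr, ih r2 h2]
      _ = ([pvHead cs r] ++ (r2 :: rs).map (pvHead cs)) ::
            pvMerge (pvMergeAll ((pvChild r).map (pvLev cs)))
              (pvMergeAll (((r2 :: rs).flatMap pvChild).map (pvLev cs))) := rfl
      _ = ((r :: r2 :: rs).map (pvHead cs)) ::
            pvMergeAll (((r :: r2 :: rs).flatMap pvChild).map (pvLev cs)) := by
          rw [← pv_mergeAll_append, ← List.map_append]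
          simp

lemma pv_loop_eq (cs : List Char) :
    ∀ (fuel : Nat) (s : List Char) (rs : List (Int × Int)),
      (∀ x ∈ rs, x.1 ≤ x.2) → pvSumW rs < fuel →
        pvLoopA cs fuel s rs = s ++ (pvMergeAll (rs.map (pvLev cs))).flatten := by
  intro fuel
  induction fuel with
  | zero => intro s rs _ hf; exact absurd hf (by omega)
  | succ fuel ih =>
    intro s rs hv hf
    by_cases hne : rs = []
    · subst hne; simp [pvLoopA, pvMergeAll]
    · have hv' : ∀ x ∈ rs.flatMap pvChild, x.1 ≤ x.2 := by
        intro x hx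
        simp only [List.mem_flatMap] at hx
        obtain ⟨r, _, hxr⟩ := hx
        exact pv_child_valid r x hxr
      have hfst : (pvSweep cs s rs).1 = s ++ rs.map (pvHead cs) := by
        rw [pvSweep, pv_foldl_fst]
      have hf' : pvSumW (rs.flatMap pvChild) < fuel := by
        have := pv_sum_strict rs hne hv
        omega
      simp only [pvLoopA, if_neg hne]
      rw [pv_sweep_snd, hfst, ih (s ++ rs.map (pvHead cs)) (rs.flatMap pvChild) hv' hf']
      obtain ⟨r, rs', rfl⟩ : ∃ r rs', rs = r :: rs' := by
        cases rs with
        | nil => exact absurd rfl hne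
        | cons a b => exact ⟨a, b, rfl⟩
      rw [pv_mergeAll_struct cs r rs' hv]
      simp [List.append_assoc]

-- ===== VERDICT (by name: the statement is the Claim_ definition above) =====
theorem scramble_phrase_spec : Claim_equal_scramble_phrase := by
  intro phrase _
  unfold Spec_scramble_phrase scramble_phrase scramble_phrase_alt
  simp only []
  by_cases h : phrase.toList.length = 0
  · rw [if_pos h, if_pos h]
  · rw [if_neg h, if_neg h]
    have hv : ∀ x ∈ [((0 : Int), (phrase.toList.length : Int) - 1)], x.1 ≤ x.2 := by
      intro x hx
      simp only [List.mem_singleton] at hx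
      subst hx
      simp only
      omega
    have hf : pvSumW [((0 : Int), (phrase.toList.length : Int) - 1)] <
        phrase.toList.length + 1 := by
      simp only [pvSumW, pvW, List.map_cons, List.map_nil, List.sum_cons, List.sum_nil]
      omega
    rw [pv_loop_eq phrase.toList (phrase.toList.length + 1) []
        [(0, (phrase.toList.length : Int) - 1)] hv hf]
    simp only [List.map_cons, List.map_nil, pvMergeAll, List.foldr_cons, List.foldr_nil,
      pv_merge_nil_right, List.nil_append]
    rw [show pvLev phrase.toList (0, (phrase.toList.length : Int) - 1) =
        pvLevels phrase.toList (phrase.toList.length + 1) 0 ((phrase.toList.length : Int) - 1) by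
      rw [pvLev]
      refine pv_levels_fuel phrase.toList _ _ _ _ ?_ ?_ <;> simp only [pvW] <;> omega]
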